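-- pv_equiv track=rewrite | github.com/nurxanov19/CodeWarsDone | somecodewars.py | complex
-- ===== SOURCE A (Python) =====
-- def complex(str: str):
--
--     collect = []
--     for j in str:
--         counter = 0
--         for i in range(1, len(j)+1):
--             if len(j)%i == 0:
--                 counter += 1
--         if counter == 2:
--             collect.append(j)
--     return collect
-- ===== SOURCE B (Python) =====
-- def _is_prime(n):
--     if n < 2:
--         return False
--     d = 2
--     while d * d <= n:
--         if n % d == 0:
--             return False
--         d += 1
--     return True
--
--
-- def complex(str):
--     return [s for s in str if _is_prime(len(s))]
-- ===== Notes on version B (the rewrite author's own statement) =====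
-- stated objective: faster
-- what changed: A counts all divisors of each length by scanning 1..len and keeps strings with exactly 2 divisors; B filters with an early-exit trial-division primality test bounded by sqrt(len).
import Mathlib
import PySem

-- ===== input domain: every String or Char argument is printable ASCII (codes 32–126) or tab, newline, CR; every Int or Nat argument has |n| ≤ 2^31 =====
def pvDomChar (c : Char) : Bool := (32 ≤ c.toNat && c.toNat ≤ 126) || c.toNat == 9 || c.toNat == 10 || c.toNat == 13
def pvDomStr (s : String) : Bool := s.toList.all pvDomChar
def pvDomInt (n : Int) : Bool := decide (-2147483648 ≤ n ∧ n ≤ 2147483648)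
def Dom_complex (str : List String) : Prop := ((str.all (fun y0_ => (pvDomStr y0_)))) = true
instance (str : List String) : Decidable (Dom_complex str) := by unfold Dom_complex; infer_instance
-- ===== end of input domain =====

-- B keeps strings whose length passes a sqrt-bounded trial-division primality test instead of
-- counting all divisors of the length; asymptotically faster per string, same return value.

-- ===== PORT A =====
-- inner loop of A: counter = number of i in 1..len(j) dividing len(j)
def pvCounter (j : String) : Int :=
  (PySem.List.pyRange 1 (PySem.Str.len j + 1) 1).foldl
    (fun counter i => if PySem.Int.mod (PySem.Str.len j) i == 0 then counter + 1 else counter) 0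

def complex (str : List String) : List String :=
  str.foldl (fun collect j => if pvCounter j == 2 then collect ++ [j] else collect) []

-- ===== PORT B =====
-- while d * d <= n: if n % d == 0: return False; d += 1
def pvTrialLoop (n d : Nat) : Bool :=
  if d * d ≤ n then
    if n % d == 0 then false else pvTrialLoop n (d + 1)
  else true
termination_by n + 1 - d
decreasing_by
  have hd : d ≤ d * d := by
    cases d with
    | zero => simp
    | succ k => exact Nat.le_mul_of_pos_left _ (Nat.succ_pos k)
  omega

def pvIsPrime (n : Int) : Bool := if n < 2 then false else pvTrialLoop n.toNat 2

def complex_alt (str : List String) : List String :=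
  str.filter (fun s => pvIsPrime (PySem.Str.len s))

-- ===== PRECONDITION & SPEC =====
def Spec_complex (str : List String) (out : List String) : Prop := out = complex_alt str
instance (str : List String) (out : List String) : Decidable (Spec_complex str out) := by unfold Spec_complex; infer_instance

-- ===== CLAIM (what is proved, stated in full; the proofs are below) =====
def Claim_equal_complex : Prop := ∀ (str : List String), Dom_complex str → Spec_complex str (complex str)

-- ===== LEMMAS AND PROOFS =====

-- A's counter is the number of divisors of the length in 1..length
theorem pvCounter_eq (j : String) :
    pvCounter j = ((List.range' 1 j.toList.length).countP
      (fun i => decide (i ∣ j.toList.length)) : Int) := by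
  unfold pvCounter
  rw [PySem.List.foldl_if_add_one, zero_add]
  congr 1
  rw [PySem.Str.len_eq, PySem.List.pyRange_one, List.range'_eq_map_range]
  simp only [List.countP_map]
  have hN : ((j.toList.length : Int) + 1 - 1).toNat = j.toList.length := by omega
  rw [hN]
  apply List.countP_congr
  intro k _
  have h1 : (1 : Int) + (k : Int) = ((1 + k : Nat) : Int) := by push_cast; ring
  simp only [Function.comp, h1, PySem.Int.mod_natCast]
  simp only [beq_iff_eq, Nat.cast_eq_zero, decide_eq_true_eq]
  rw [Nat.dvd_iff_mod_eq_zero]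

-- that divisor count equals the cardinality of N.divisors
theorem countP_range'_eq_card_divisors (N : Nat) :
    (List.range' 1 N).countP (fun i => decide (i ∣ N)) = N.divisors.card := by
  rw [Nat.divisors, Nat.Ico_eq_range']
  simp [Finset.filter, Finset.card_mk, List.countP_eq_length_filter]

-- having exactly two divisors is primality
theorem card_divisors_two (N : Nat) : N.divisors.card = 2 ↔ N.Prime := by
  constructor
  · intro h
    have hN0 : N ≠ 0 := by rintro rfl; simp at h
    have hN1 : N ≠ 1 := by rintro rfl; simp [Nat.divisors_one] at h
    have h2 : 2 ≤ N := by omega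
    have hsub : ({1, N} : Finset Nat) ⊆ N.divisors := by
      intro m hm
      simp only [Finset.mem_insert, Finset.mem_singleton] at hm
      rcases hm with rfl | rfl <;> simp [Nat.mem_divisors, hN0]
    have hcard : ({1, N} : Finset Nat).card = 2 := by
      rw [Finset.card_insert_of_notMem (by simp; omega), Finset.card_singleton]
    have heq : ({1, N} : Finset Nat) = N.divisors :=
      Finset.eq_of_subset_of_card_le hsub (by omega)
    rw [Nat.prime_def_lt]
    refine ⟨h2, fun m hm hdvd => ?_⟩
    have : m ∈ N.divisors := Nat.mem_divisors.2 ⟨hdvd, hN0⟩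
    rw [← heq] at this
    simp only [Finset.mem_insert, Finset.mem_singleton] at this
    omega
  · intro hp
    rw [hp.divisors,
      Finset.card_insert_of_notMem (by simp; exact fun h => by have := hp.two_le; omega),
      Finset.card_singleton]

-- B's trial-division loop checks for a divisor m with d ≤ m and m*m ≤ n
theorem pvTrialLoop_iff (n d : Nat) :
    pvTrialLoop n d = true ↔ ∀ m, d ≤ m → m * m ≤ n → ¬ m ∣ n := by
  fun_induction pvTrialLoop n d with
  | case1 d h hm =>
    simp only [Bool.false_eq_true, false_iff]
    push Not
    exact ⟨d, le_refl d, h, Nat.dvd_of_mod_eq_zero (by simpa using hm)⟩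
  | case2 d h hm ih =>
    rw [ih]
    constructor
    · intro hall m hdm hmm
      rcases Nat.eq_or_lt_of_le hdm with rfl | hlt
      · intro hdvd
        exact absurd (Nat.mod_eq_zero_of_dvd hdvd) (by simpa using hm)
      · exact hall m hlt hmm
    · intro hall m hdm hmm
      exact hall m (by omega) hmm
  | case3 d h =>
    simp only [true_iff]
    intro m hdm hmm hdvd
    have : d * d ≤ m * m := Nat.mul_le_mul hdm hdm
    omega

-- B's primality test decides Nat.Prime
theorem pvIsPrime_natCast (N : Nat) : pvIsPrime (N : Int) = decide N.Prime := by
  unfold pvIsPrime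
  by_cases h2 : N < 2
  · have hnp : ¬ N.Prime := fun hp => by have := hp.two_le; omega
    have hlt : (N : Int) < 2 := by exact_mod_cast h2
    simp [hlt, hnp]
  · have hlt : ¬ ((N : Int) < 2) := by exact_mod_cast h2
    simp only [hlt, if_false, Int.toNat_natCast]
    have hloop : pvTrialLoop N 2 = true ↔ N.Prime := by
      rw [pvTrialLoop_iff, Nat.prime_def_le_sqrt]
      constructor
      · intro h
        exact ⟨by omega, fun m hm hms => h m hm (Nat.le_sqrt.1 hms)⟩
      · rintro ⟨-, h⟩ m hm hmm
        exact h m hm (Nat.le_sqrt.2 hmm)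
    rw [Bool.eq_iff_iff, hloop, decide_eq_true_iff]

-- pointwise: A's "exactly two divisors" test equals B's primality test
theorem pvTest_eq (j : String) :
    (pvCounter j == 2) = pvIsPrime (PySem.Str.len j) := by
  rw [PySem.Str.len_eq, pvIsPrime_natCast, pvCounter_eq, countP_range'_eq_card_divisors]
  rw [Bool.eq_iff_iff, beq_iff_eq, decide_eq_true_iff, ← card_divisors_two]
  constructor
  · intro h; exact_mod_cast h
  · intro h; exact_mod_cast h

-- ===== VERDICT (by name: the statement is the Claim_ definition above) =====
theorem complex_spec : Claim_equal_complex := by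
  intro str _
  unfold Spec_complex complex complex_alt
  rw [PySem.List.foldl_append_if_eq_filter, List.nil_append]
  simp only [pvTest_eq]
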